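-- pv_equiv track=rewrite | github.com/Yerimi11/Algorithm_basic | Programmers/완전탐색_수포자.py | solution
-- ===== SOURCE A (Python) =====
-- def solution(answers):
--     answer = []     # 1, 2, 3번 수포자 중 가장 많은 정답을 맞힌 사람의 번호 삽입
--     # 1, 2, 3번 수포자의 정답 갯수를 담기
--     # a_count = 0     # 1 2 3 4 5 순서대로 반복하는 규칙
--     # b_count = 0     # 1 3 4 5 앞에 2를 넣는 규칙
--     # c_count = 0     # 3 1 2 4 5 두 번씩 반복하는 규칙
--     # a_answer = []
--     # b_answer = []
--     # c_answer = []
--     counts = [0, 0, 0]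
--     a_answer = [1, 2, 3, 4, 5]
--     b_answer = [2, 1, 2, 3, 2, 4, 2, 5]
--     c_answer = [3, 3, 1, 1, 2, 2, 4, 4, 5, 5]
--
--     # 수포자들이 찍은 번호 배열
--     for i in range(len(answers)):
-- #         a_answer.append(i+1)
-- #         if i > 0 and b_answer[-1] != 2:
-- #             b_answer.append(i+1)
-- #         else:
-- #             b_answer.append(2)
--
-- #         if i % 10 == 0 or 1:
-- #             c_answer.append(3) # 33 11 22 44 55 / 01 23 45 67 89
-- #         elif i % 10 == 2 or 3:
-- #             c_answer.append(1)
-- #         elif i % 10 == 4 or 5: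
-- #             c_answer.append(2)
-- #         elif i % 10 == 6 or 7:
-- #             c_answer.append(4)
-- #         elif i % 10 == 8 or 9:
-- #             c_answer.append(5)
--         if answers[i] == a_answer[(i%5)]:
--             counts[0] += 1
--         if answers[i] == b_answer[(i%8)]:
--             counts[1] += 1
--         if answers[i] == c_answer[(i%10)]:
--             counts[2] += 1
--
--
--     # 완전탐색(브루트포스)이니, 컴퓨터의 속도를 믿고 무식하게 전부 다 찾아 볼 것.
--     # 맞은 갯수 카운팅
--     # for i in range(len(answers)):
--     #     if a_answer[i] == answers[i]:
--     #         a_count += 1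
--     #     if b_answer[i] == answers[i]:
--     #         b_count += 1
--     #     if c_answer[i] == answers[i]:
--     #         c_count += 1
--
--     # temp = []     # count 중 max값 찾아서 temp에 넣기
--     # temp.append(max(a_count, b_count, c_count))
--     # answer.append(a_count)
--     # answer.append(b_count)
--     # answer.append(c_count)
--
--     # 가장 높은 점수를 받은 학생은 전부 다 출력해야하니까, max값과 학생 번호(i+1)이 같은지 찾는다
--     for i in range(3):
--         if counts[i] == max(counts): # count max값 여기서 찾는 걸로 수정.
--             answer.append(i+1)
--
--     return answer
-- ===== SOURCE B (Python) =====
-- def solution(answers):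
--     # Residue-class histogram: one pass builds hist[(i % 40, value)] (40 = lcm of the
--     # three pattern lengths), then each pattern's score is read off by 40 table lookups
--     # without rescanning answers.
--     hist = {}
--     for i, a in enumerate(answers):
--         key = (i % 40, a)
--         hist[key] = hist.get(key, 0) + 1
--     patterns = [[1, 2, 3, 4, 5],
--                 [2, 1, 2, 3, 2, 4, 2, 5],
--                 [3, 3, 1, 1, 2, 2, 4, 4, 5, 5]]
--     counts = [sum(hist.get((r, p[r % len(p)]), 0) for r in range(40)) for p in patterns]
--     best = max(counts)
--     return [i + 1 for i in range(3) if counts[i] == best]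
-- ===== Notes on version B (the rewrite author's own statement) =====
-- stated objective: alternative
-- what changed: A's single loop updating three counters per element is replaced by a residue-class histogram (one pass indexes answers by (i mod 40, value), 40 = lcm of the pattern lengths), from which each pattern's score is computed by 40 table lookups without rescanning the answers; selection of the winners stays a final comprehension.
import Mathlib
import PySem

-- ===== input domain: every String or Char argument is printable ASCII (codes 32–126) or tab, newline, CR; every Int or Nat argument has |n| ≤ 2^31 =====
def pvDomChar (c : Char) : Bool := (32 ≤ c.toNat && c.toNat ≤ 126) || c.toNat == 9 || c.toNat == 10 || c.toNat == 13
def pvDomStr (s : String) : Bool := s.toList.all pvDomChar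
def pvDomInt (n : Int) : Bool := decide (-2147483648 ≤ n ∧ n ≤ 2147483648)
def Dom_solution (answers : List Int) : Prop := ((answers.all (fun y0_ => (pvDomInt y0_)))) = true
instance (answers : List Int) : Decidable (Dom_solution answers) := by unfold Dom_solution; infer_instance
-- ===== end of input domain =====

-- B replaces A's per-element triple-counter loop by a residue-class histogram
-- (one pass indexing answers by (i mod 40, value), 40 = lcm of the pattern lengths)
-- from which each pattern's score is read off by 40 table lookups (objective: alternative).

-- ===== PORT A =====
-- A's 'for i in range(len(answers))' reading answers[i] is ported as a fold over
-- answers.zipIdx (value together with its index i); the three-element Python list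
-- 'counts' is represented by the triple (counts[0], counts[1], counts[2]).
def solution (answers : List Int) : List Int :=
  let a_answer : List Int := [1, 2, 3, 4, 5]
  let b_answer : List Int := [2, 1, 2, 3, 2, 4, 2, 5]
  let c_answer : List Int := [3, 3, 1, 1, 2, 2, 4, 4, 5, 5]
  let counts : Int × Int × Int :=
    answers.zipIdx.foldl (fun c (p : Int × Nat) =>
      let c := if p.1 = a_answer.getD (p.2 % 5) 0 then (c.1 + 1, c.2.1, c.2.2) else c
      let c := if p.1 = b_answer.getD (p.2 % 8) 0 then (c.1, c.2.1 + 1, c.2.2) else c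
      if p.1 = c_answer.getD (p.2 % 10) 0 then (c.1, c.2.1, c.2.2 + 1) else c) (0, 0, 0)
  -- max(counts)
  let m : Int := max counts.1 (max counts.2.1 counts.2.2)
  -- for i in range(3): if counts[i] == max(counts): answer.append(i+1)
  (List.range 3).foldl (fun ans i =>
    if [counts.1, counts.2.1, counts.2.2].getD i 0 = m then ans ++ [(i : Int) + 1] else ans) []

-- ===== PORT B =====
-- hist = {}; for i, a in enumerate(answers): hist[(i % 40, a)] = hist.get((i % 40, a), 0) + 1
-- counts = [sum(hist.get((r, p[r % len(p)]), 0) for r in range(40)) for p in patterns]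
def solution_alt (answers : List Int) : List Int :=
  let hist : PySem.Dict (Int × Int) Int :=
    (PySem.List.enumerate answers 0).foldl (fun d q =>
      d.insert (PySem.Int.mod q.1 40, q.2) (d.getD (PySem.Int.mod q.1 40, q.2) 0 + 1))
      PySem.Dict.empty
  let patterns : List (List Int) :=
    [[1, 2, 3, 4, 5], [2, 1, 2, 3, 2, 4, 2, 5], [3, 3, 1, 1, 2, 2, 4, 4, 5, 5]]
  let counts : List Int := patterns.map (fun p =>
    ((PySem.List.pyRange 0 40 1).map (fun r =>
      hist.getD (r, PySem.List.pyGetD p (PySem.Int.mod r (p.length : Int)) 0) 0)).sum)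
  let best : Int := max (counts.getD 0 0) (max (counts.getD 1 0) (counts.getD 2 0))
  ((List.range 3).filter (fun i => counts.getD i 0 = best)).map (fun i => (i : Int) + 1)

-- ===== PRECONDITION & SPEC =====
def Spec_solution (answers : List Int) (out : List Int) : Prop := out = solution_alt answers
instance (answers : List Int) (out : List Int) : Decidable (Spec_solution answers out) := by unfold Spec_solution; infer_instance

-- ===== CLAIM (what is proved, stated in full; the proofs are below) =====
def Claim_equal_solution : Prop := ∀ (answers : List Int), Dom_solution answers → Spec_solution answers (solution answers)

-- ===== LEMMAS AND PROOFS =====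

-- index-based count, the common reference form of both programs' counting
def cIdx (pat : List Int) : Nat → List Int → Int
  | _, [] => 0
  | s, a :: rest => (if a = pat.getD (s % pat.length) 0 then 1 else 0) + cIdx pat (s + 1) rest

-- A's fold over enumerated answers splits into three independent index-counts
lemma foldA_eq (pa pb pc : List Int) (xs : List Int) (s : Nat) (c : Int × Int × Int) :
    (xs.zipIdx s).foldl (fun c (p : Int × Nat) =>
      let c := if p.1 = pa.getD (p.2 % pa.length) 0 then (c.1 + 1, c.2.1, c.2.2) else c
      let c := if p.1 = pb.getD (p.2 % pb.length) 0 then (c.1, c.2.1 + 1, c.2.2) else c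
      if p.1 = pc.getD (p.2 % pc.length) 0 then (c.1, c.2.1, c.2.2 + 1) else c) c
    = (c.1 + cIdx pa s xs, c.2.1 + cIdx pb s xs, c.2.2 + cIdx pc s xs) := by
  induction xs generalizing s c with
  | nil => simp [cIdx]
  | cons a rest ih =>
    simp only [List.zipIdx_cons, List.foldl_cons]
    rw [ih]
    show _ = (c.1 + cIdx pa s (a :: rest), c.2.1 + cIdx pb s (a :: rest),
      c.2.2 + cIdx pc s (a :: rest))
    simp only [cIdx]
    split_ifs <;> simp <;> omega

-- looking up any key in the histogram built by B's loop counts it in the keyed list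
lemma getD_hist (l : List (Int × Int)) (v : Int × Int) :
    PySem.Dict.getD (l.foldl (fun d q =>
      PySem.Dict.insert d (PySem.Int.mod q.1 40, q.2)
        (PySem.Dict.getD d (PySem.Int.mod q.1 40, q.2) 0 + 1)) PySem.Dict.empty) v 0
    = (((l.map (fun q => (PySem.Int.mod q.1 40, q.2))).count v : Nat) : Int) := by
  rw [← List.foldl_map (f := fun q : Int × Int => (PySem.Int.mod q.1 40, q.2))
    (g := fun d x => PySem.Dict.insert d x (PySem.Dict.getD d x 0 + 1))]
  rw [PySem.Dict.getD_foldl_insert_add_one]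
  simp

-- a cons whose first component is outside rs contributes nothing to any of the counts
lemma sum_count_cons_notmem (rs : List Int) (t : Int → Int) (k0 a : Int)
    (K : List (Int × Int)) (h : k0 ∉ rs) :
    (rs.map (fun r => ((((k0, a) :: K).count (r, t r) : Nat) : Int))).sum
    = (rs.map (fun r => ((K.count (r, t r) : Nat) : Int))).sum := by
  induction rs with
  | nil => rfl
  | cons r rs' ih =>
    have hr : r ≠ k0 := fun he => h (he ▸ List.mem_cons_self)
    have hcnt : ((k0, a) :: K).count (r, t r) = K.count (r, t r) := by
      rw [List.count_cons]
      simp [Prod.ext_iff]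
      exact fun h _ => hr h.symm
    simp only [List.map_cons, List.sum_cons, hcnt,
      ih (fun hm => h (List.mem_cons_of_mem _ hm))]

-- a cons whose first component occurs once in rs contributes its match indicator
lemma sum_count_cons (rs : List Int) (hnd : rs.Nodup) (t : Int → Int) (k0 : Int)
    (hk : k0 ∈ rs) (a : Int) (K : List (Int × Int)) :
    (rs.map (fun r => ((((k0, a) :: K).count (r, t r) : Nat) : Int))).sum
    = (if a = t k0 then 1 else 0)
      + (rs.map (fun r => ((K.count (r, t r) : Nat) : Int))).sum := by
  induction rs with
  | nil => cases hk
  | cons r rs' ih =>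
    rcases List.nodup_cons.mp hnd with ⟨hrn, hnd'⟩
    by_cases hr : r = k0
    · subst hr
      have hcnt : ((r, a) :: K).count (r, t r)
          = K.count (r, t r) + (if a = t r then 1 else 0) := by
        rw [List.count_cons]
        by_cases hat : a = t r
        · simp [hat]
        · simp [Prod.ext_iff, hat]
      simp only [List.map_cons, List.sum_cons, hcnt,
        sum_count_cons_notmem rs' t r a K hrn]
      push_cast
      ring
    · have hk' : k0 ∈ rs' := by
        rcases List.mem_cons.mp hk with h | h
        · exact absurd h.symm hr
        · exact h
      have hcnt : ((k0, a) :: K).count (r, t r) = K.count (r, t r) := by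
        rw [List.count_cons]
        simp [Prod.ext_iff]
        exact fun h _ => hr h.symm
      simp only [List.map_cons, List.sum_cons, hcnt, ih hnd' hk']
      ring

-- the 40 histogram lookups for a pattern whose length divides 40 count exactly cIdx
lemma sum_hist (p : List Int) (hd : p.length ∣ 40) (xs : List Int) (s : Nat) :
    ((PySem.List.pyRange 0 40 1).map (fun r =>
      ((((PySem.List.enumerate xs (s : Int)).map
          (fun q => (PySem.Int.mod q.1 40, q.2))).count
        (r, PySem.List.pyGetD p (PySem.Int.mod r (p.length : Int)) 0) : Nat) : Int))).sum
    = cIdx p s xs := by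
  induction xs generalizing s with
  | nil =>
    simp [PySem.List.enumerate, cIdx]
  | cons a rest ih =>
    rw [PySem.List.enumerate_cons]
    have hmod : PySem.Int.mod (s : Int) 40 = ((s % 40 : Nat) : Int) := by
      exact_mod_cast PySem.Int.mod_natCast s 40
    have hs1 : (s : Int) + 1 = ((s + 1 : Nat) : Int) := by push_cast; ring
    simp only [List.map_cons, hmod, hs1]
    have hmem : (((s % 40 : Nat)) : Int) ∈ PySem.List.pyRange 0 40 1 :=
      PySem.List.mem_pyRange_one.mpr
        ⟨by positivity, by exact_mod_cast Nat.mod_lt s (by norm_num)⟩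
    rw [sum_count_cons (PySem.List.pyRange 0 40 1) (PySem.List.nodup_pyRange_one 0 40)
      _ _ hmem a _]
    rw [ih (s + 1)]
    have ht : PySem.List.pyGetD p (PySem.Int.mod ((s % 40 : Nat) : Int) (p.length : Int)) 0
        = p.getD (s % p.length) 0 := by
      have h2 : PySem.Int.mod ((s % 40 : Nat) : Int) (p.length : Int)
          = (((s % 40) % p.length : Nat) : Int) := PySem.Int.mod_natCast _ _
      rw [h2, PySem.List.pyGetD_natCast, Nat.mod_mod_of_dvd s hd]
    rw [ht]
    rfl

theorem solution_eq_alt (answers : List Int) : solution answers = solution_alt answers := by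
  unfold solution solution_alt
  have hA := foldA_eq [1,2,3,4,5] [2,1,2,3,2,4,2,5] [3,3,1,1,2,2,4,4,5,5] answers 0 (0,0,0)
  have l1 : ([1,2,3,4,5] : List Int).length = 5 := rfl
  have l2 : ([2,1,2,3,2,4,2,5] : List Int).length = 8 := rfl
  have l3 : ([3,3,1,1,2,2,4,4,5,5] : List Int).length = 10 := rfl
  simp only [l1, l2, l3, Int.zero_add] at hA
  have e1 := sum_hist [1,2,3,4,5] (by decide) answers 0
  have e2 := sum_hist [2,1,2,3,2,4,2,5] (by decide) answers 0
  have e3 := sum_hist [3,3,1,1,2,2,4,4,5,5] (by decide) answers 0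
  rw [l1] at e1; rw [l2] at e2; rw [l3] at e3
  simp only [Nat.cast_zero] at e1 e2 e3
  simp only [List.map, getD_hist, l1, l2, l3, e1, e2, e3]
  rw [hA]
  generalize cIdx [1,2,3,4,5] 0 answers = x1
  generalize cIdx [2,1,2,3,2,4,2,5] 0 answers = x2
  generalize cIdx [3,3,1,1,2,2,4,4,5,5] 0 answers = x3
  simp only [List.range_succ, List.range_zero, List.nil_append, List.cons_append,
    List.foldl_cons, List.foldl_nil, List.filter_cons, List.filter_nil,
    List.getD, List.getElem?_cons_zero, List.getElem?_cons_succ, Option.getD_some,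
    decide_eq_true_eq]
  split_ifs <;> simp

-- ===== VERDICT (by name: the statement is the Claim_ definition above) =====
theorem solution_spec : Claim_equal_solution := by
  intro answers _
  exact solution_eq_alt answers
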